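-- pv_equiv track=rewrite | github.com/bledidalipaj/codefights | challenges/python/emojticon.py | Emojticon
-- ===== SOURCE A (Python) =====
-- def Emojticon(message, emoticons):
--     word = ''
--     newMessage = []
--     for char in message:
--         if char != ' ':
--             word += char
--         else:
--             if len(word) > 0:
--                 if word in emoticons:
--                     word = '[' + word + ']'
--                 newMessage.append(word)
--             newMessage.append(' ')
--             word = ''
--     if word in emoticons:
--         newMessage.append('[' + word + ']')
--     else:
--         newMessage.append(word)
--     return "".join(newMessage)
-- ===== SOURCE B (Python) =====
-- def Emojticon(message, emoticons):
--     emo = set(emoticons)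
--     return ' '.join('[' + p + ']' if p and p in emo else p
--                     for p in message.split(' '))
-- ===== Notes on version B (the rewrite author's own statement) =====
-- stated objective: simpler
-- what changed: Replaces A's char-by-char buffer scan that assembles a fragment list with a token-level split/map/join: split on ' ', wrap each non-empty token found in a set of emoticons, join back with ' '.
-- intended difference: When '' is in emoticons and the message is empty or ends with a space, A wraps the trailing empty word and appends '[]' to the output; B never brackets an empty token, which is the intended behaviour since there is no word there to wrap. — e.g. on Emojticon("x ", ["", "x"]): A returns "[x] []", B returns "[x] "
import Mathlib
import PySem

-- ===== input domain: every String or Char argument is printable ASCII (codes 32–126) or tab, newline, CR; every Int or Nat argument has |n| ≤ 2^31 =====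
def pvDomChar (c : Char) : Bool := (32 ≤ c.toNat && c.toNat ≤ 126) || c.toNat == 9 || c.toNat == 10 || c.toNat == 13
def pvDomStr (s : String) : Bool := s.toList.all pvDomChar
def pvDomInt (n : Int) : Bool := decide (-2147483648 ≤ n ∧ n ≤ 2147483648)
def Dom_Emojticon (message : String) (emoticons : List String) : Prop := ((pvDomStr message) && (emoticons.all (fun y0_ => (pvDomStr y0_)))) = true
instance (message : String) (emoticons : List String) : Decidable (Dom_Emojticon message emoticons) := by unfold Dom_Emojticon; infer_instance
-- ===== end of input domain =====

-- B replaces A's char-by-char buffer scan with a token-level split/map/join (objective: simpler);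
-- on messages ending in a space (or empty) with '' ∈ emoticons, A appends a spurious '[]' and B does not (see D_).

-- ===== PORT A =====
-- 'word in emoticons' (string equality) ported as membership of the char list among the emoticons' char lists
def pvMemA (emoticons : List String) (word : List Char) : Bool :=
  (emoticons.map String.toList).contains word

-- the body of A's 'for char in message' loop, over the state (word, newMessage)
def pvStepA (emoticons : List String) (st : List Char × List (List Char)) (char : Char) :
    List Char × List (List Char) :=
  if char ≠ ' ' then (st.1 ++ [char], st.2)
  else
    let newMessage :=
      if st.1.length > 0 then
        st.2 ++ [if pvMemA emoticons st.1 then '[' :: st.1 ++ [']'] else st.1]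
      else st.2
    ([], newMessage ++ [[' ']])

def Emojticon (message : String) (emoticons : List String) : String :=
  let st := message.toList.foldl (pvStepA emoticons) ([], [])
  let newMessage :=
    if pvMemA emoticons st.1 then st.2 ++ ['[' :: st.1 ++ [']']] else st.2 ++ [st.1]
  String.ofList newMessage.flatten   -- "".join(newMessage)

-- ===== PORT B =====
def Emojticon_alt (message : String) (emoticons : List String) : String :=
  let emo : PySem.Set (List Char) := PySem.Set.ofList (emoticons.map String.toList)
  String.ofList (List.intercalate [' ']                            -- ' '.join(…)
    ((message.toList.splitOn ' ').map                          -- message.split(' ')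
      (fun p => if p ≠ [] ∧ p ∈ emo then '[' :: p ++ [']'] else p)))

-- ===== PRECONDITION & SPEC =====
-- When '' ∈ emoticons and the message is empty or ends with ' ', A brackets the trailing EMPTY word and
-- appends '[]'; B never brackets an empty token, which is the intended behaviour (there is no word there).
def D_Emojticon (message : String) (emoticons : List String) : Prop :=
  "" ∈ emoticons ∧ (message.toList = [] ∨ message.toList.getLast? = some ' ')
instance (message : String) (emoticons : List String) : Decidable (D_Emojticon message emoticons) := by
  unfold D_Emojticon; infer_instance

def Spec_Emojticon (message : String) (emoticons : List String) (out : String) : Prop :=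
  ¬ D_Emojticon message emoticons → out = Emojticon_alt message emoticons
instance (message : String) (emoticons : List String) (out : String) : Decidable (Spec_Emojticon message emoticons out) := by unfold Spec_Emojticon; infer_instance

def pvDiffWitness_Emojticon : String × List String := ("x ", ["", "x"])
def pvDiffWitnessOut_Emojticon : String × String := ("[x] []", "[x] ")

-- ===== CLAIM (what is proved, stated in full; the proofs are below) =====
def Claim_unchanged_Emojticon : Prop := ∀ (message : String) (emoticons : List String), Dom_Emojticon message emoticons → Spec_Emojticon message emoticons (Emojticon message emoticons)
def Claim_changed_Emojticon : Prop := Dom_Emojticon (pvDiffWitness_Emojticon.1) (pvDiffWitness_Emojticon.2) ∧ D_Emojticon (pvDiffWitness_Emojticon.1) (pvDiffWitness_Emojticon.2) ∧ Emojticon (pvDiffWitness_Emojticon.1) (pvDiffWitness_Emojticon.2) = pvDiffWitnessOut_Emojticon.1 ∧ Emojticon_alt (pvDiffWitness_Emojticon.1) (pvDiffWitness_Emojticon.2) = pvDiffWitnessOut_Emojticon.2 ∧ pvDiffWitnessOut_Emojticon.1 ≠ pvDiffWitnessOut_Emojticon.2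
def Claim_exact_Emojticon : Prop := ∀ (message : String) (emoticons : List String), Dom_Emojticon message emoticons → D_Emojticon message emoticons → Emojticon message emoticons ≠ Emojticon_alt message emoticons

-- ===== LEMMAS AND PROOFS =====

-- A's result as a structural recursion over the remaining characters (word = chars accumulated so far)
def pvOutA (em : List String) : List Char → List Char → List Char
  | w, [] => if pvMemA em w then '[' :: w ++ [']'] else w
  | w, c :: cs =>
      if c ≠ ' ' then pvOutA em (w ++ [c]) cs
      else (if w.length > 0 then (if pvMemA em w then '[' :: w ++ [']'] else w) else [])
            ++ ' ' :: pvOutA em [] cs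

-- B's wrapping of one token, on the Bool side
def pvWrapB (em : List String) (p : List Char) : List Char :=
  if p ≠ [] ∧ pvMemA em p then '[' :: p ++ [']'] else p

-- B's result in the same recursion shape
def pvOutB (em : List String) : List Char → List Char → List Char
  | w, [] => pvWrapB em w
  | w, c :: cs =>
      if c = ' ' then pvWrapB em w ++ ' ' :: pvOutB em [] cs
      else pvOutB em (w ++ [c]) cs

lemma pvFoldA (em : List String) (cs : List Char) : ∀ (w : List Char) (acc : List (List Char)),
    (let st := cs.foldl (pvStepA em) (w, acc)
     (if pvMemA em st.1 then st.2 ++ ['[' :: st.1 ++ [']']] else st.2 ++ [st.1]).flatten)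
      = acc.flatten ++ pvOutA em w cs := by
  induction cs with
  | nil =>
    intro w acc
    simp only [List.foldl_nil, pvOutA]
    split <;> simp
  | cons c cs ih =>
    intro w acc
    by_cases hc : c = ' '
    · subst hc
      simp only [List.foldl_cons, pvStepA, pvOutA, ne_eq, not_true_eq_false, if_false]
      rw [ih]
      split_ifs <;> simp
    · simp only [List.foldl_cons, pvStepA, pvOutA, ne_eq, hc, not_false_eq_true, if_true]
      exact ih (w ++ [c]) acc

lemma pvEmojA (message : String) (emoticons : List String) :
    Emojticon message emoticons = String.ofList (pvOutA emoticons [] message.toList) := by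
  show String.ofList _ = _
  rw [pvFoldA emoticons message.toList [] []]
  rfl

lemma pvOutB_eq (em : List String) (cs : List Char) : ∀ (w : List Char),
    pvOutB em w cs
      = List.intercalate [' '] (((w ++ (cs.splitOn ' ').headI) :: (cs.splitOn ' ').tail).map (pvWrapB em)) := by
  induction cs with
  | nil =>
    intro w
    simp [pvOutB, List.splitOn_nil, List.intercalate]
  | cons c cs ih =>
    intro w
    obtain ⟨p, ps, hps⟩ : ∃ p ps, cs.splitOn ' ' = p :: ps := by
      cases h : cs.splitOn ' ' with
      | nil => exact absurd h (List.splitOnP_ne_nil _ cs)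
      | cons p ps => exact ⟨p, ps, rfl⟩
    by_cases hc : c = ' '
    · subst hc
      have hsp : (' ' :: cs).splitOn ' ' = [] :: p :: ps := by
        show List.splitOnP _ _ = _
        rw [List.splitOnP_cons]
        simp [show List.splitOnP (fun b => b == ' ') cs = p :: ps from hps]
      rw [hsp]
      simp only [pvOutB, ih []]
      rw [hps]
      simp [List.intercalate]
    · have hsp : (c :: cs).splitOn ' ' = (c :: p) :: ps := by
        show List.splitOnP _ _ = _
        rw [List.splitOnP_cons]
        simp [hc, show List.splitOnP (fun b => b == ' ') cs = p :: ps from hps]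
      rw [hsp]
      simp only [pvOutB, if_neg hc, ih (w ++ [c]), hps]
      simp

lemma pvEmojB (message : String) (emoticons : List String) :
    Emojticon_alt message emoticons = String.ofList (pvOutB emoticons [] message.toList) := by
  show String.ofList _ = _
  rw [pvOutB_eq]
  congr 1
  have hne := List.splitOnP_ne_nil (fun b => b == ' ') message.toList
  have hht : (message.toList.splitOn ' ').headI :: (message.toList.splitOn ' ').tail
      = message.toList.splitOn ' ' := by
    cases h : message.toList.splitOn ' ' with
    | nil => exact absurd h hne
    | cons a t => rfl
  rw [List.nil_append, hht]
  congr 1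
  apply List.map_congr_left
  intro p _
  simp [pvWrapB, pvMemA, PySem.Set.mem_ofList]

lemma pvAgree (em : List String) (cs : List Char) : ∀ (w : List Char),
    ¬ (pvMemA em [] = true ∧ ((cs = [] ∧ w = []) ∨ cs.getLast? = some ' ')) →
    pvOutA em w cs = pvOutB em w cs := by
  induction cs with
  | nil =>
    intro w h
    simp only [pvOutA, pvOutB, pvWrapB]
    rcases eq_or_ne w [] with hw | hw
    · subst hw
      have hm : ¬ pvMemA em [] = true := fun hm => h ⟨hm, Or.inl ⟨rfl, rfl⟩⟩
      simp [hm]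
    · simp [hw]
  | cons c cs ih =>
    intro w h
    by_cases hc : c = ' '
    · subst hc
      simp only [pvOutA, pvOutB, ne_eq, not_true_eq_false, if_false]
      have hrec : pvOutA em [] cs = pvOutB em [] cs := by
        apply ih
        rintro ⟨hm, hcs⟩
        apply h
        refine ⟨hm, Or.inr ?_⟩
        rcases hcs with ⟨hnil, -⟩ | hlast
        · subst hnil; rfl
        · cases cs with
          | nil => simp at hlast
          | cons d ds => simpa using hlast
      rw [hrec]
      rcases eq_or_ne w [] with hw | hw
      · subst hw; simp [pvWrapB]
      · simp [pvWrapB, hw, List.length_pos_iff.mpr hw]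
    · simp only [pvOutA, pvOutB, ne_eq, hc, not_false_eq_true, if_true]
      apply ih
      rintro ⟨hm, hcs⟩
      apply h
      refine ⟨hm, Or.inr ?_⟩
      rcases hcs with ⟨hnil, hwc⟩ | hlast
      · exact absurd hwc (by simp)
      · cases cs with
        | nil => simp at hlast
        | cons d ds => simpa using hlast

lemma pvDiffer (em : List String) (cs : List Char) : ∀ (w : List Char),
    pvMemA em [] = true → ((cs = [] ∧ w = []) ∨ cs.getLast? = some ' ') →
    pvOutA em w cs = pvOutB em w cs ++ ['[', ']'] := by
  induction cs with
  | nil =>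
    intro w hm hcs
    have hw : w = [] := by
      rcases hcs with ⟨-, hw⟩ | hlast
      · exact hw
      · simp at hlast
    subst hw
    simp [pvOutA, pvOutB, pvWrapB, hm]
  | cons c cs ih =>
    intro w hm hcs
    have hlast : (c :: cs).getLast? = some ' ' := by
      rcases hcs with ⟨hnil, -⟩ | hlast
      · simp at hnil
      · exact hlast
    by_cases hc : c = ' '
    · subst hc
      simp only [pvOutA, pvOutB, ne_eq, not_true_eq_false, if_false]
      have hrec : pvOutA em [] cs = pvOutB em [] cs ++ ['[', ']'] := by
        apply ih _ hm
        cases cs with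
        | nil => exact Or.inl ⟨rfl, rfl⟩
        | cons d ds => exact Or.inr (by simpa using hlast)
      rw [hrec]
      rcases eq_or_ne w [] with hw | hw
      · subst hw; simp [pvWrapB]
      · simp [pvWrapB, hw, List.length_pos_iff.mpr hw]
    · have hcs' : cs ≠ [] := by
        rintro rfl
        simp at hlast
        exact hc hlast
      simp only [pvOutA, pvOutB, ne_eq, hc, not_false_eq_true, if_true]
      apply ih _ hm
      refine Or.inr ?_
      cases cs with
      | nil => exact absurd rfl hcs'
      | cons d ds => simpa using hlast

lemma pvMemA_nil_iff (em : List String) : pvMemA em [] = true ↔ "" ∈ em := by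
  simp only [pvMemA, List.contains_iff_mem, List.mem_map]
  constructor
  · rintro ⟨s, hs, hnil⟩
    have : s = "" := String.toList_eq_nil_iff.mp hnil
    exact this ▸ hs
  · intro h
    exact ⟨"", h, rfl⟩

-- ===== VERDICT (by name: the statement is the Claim_ definition above) =====
theorem Emojticon_spec : Claim_unchanged_Emojticon := by
  intro message emoticons _ hD
  rw [pvEmojA, pvEmojB]
  congr 1
  apply pvAgree
  rintro ⟨hm, hcs⟩
  apply hD
  refine ⟨(pvMemA_nil_iff emoticons).mp hm, ?_⟩
  rcases hcs with ⟨hnil, -⟩ | hlast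
  · exact Or.inl hnil
  · exact Or.inr hlast

theorem Emojticon_changed : Claim_changed_Emojticon := by
  unfold Claim_changed_Emojticon; decide

theorem Emojticon_tight : Claim_exact_Emojticon := by
  intro message emoticons _ hD heq
  obtain ⟨hm, hcs⟩ := hD
  have hm' : pvMemA emoticons [] = true := (pvMemA_nil_iff emoticons).mpr hm
  have hcs' : (message.toList = [] ∧ ([] : List Char) = []) ∨ message.toList.getLast? = some ' ' := by
    rcases hcs with hnil | hlast
    · exact Or.inl ⟨hnil, rfl⟩
    · exact Or.inr hlast
  have hdiff := pvDiffer emoticons message.toList [] hm' hcs'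
  rw [pvEmojA, pvEmojB] at heq
  have : pvOutA emoticons [] message.toList = pvOutB emoticons [] message.toList := by
    have := congrArg String.toList heq
    simpa using this
  rw [this] at hdiff
  simp at hdiff
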